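-- pv_equiv track=rewrite | github.com/binref/refinery | refinery/lib/ole/crypto.py | verifypw
-- ===== SOURCE A (Python) =====
-- def verifypw(password: str, verification_bytes: int) -> bool:
--     verifier = 0
--     pw_arr = [len(password)] + [ord(ch) for ch in password]
--     pw_arr.reverse()
--     for b in pw_arr:
--         if verifier & 0x4000:
--             intermediate = 1
--         else:
--             intermediate = 0
--         verifier = (intermediate ^ ((verifier * 2) & 0x7FFF)) ^ b
--     return (verifier ^ 0xCE4B) == verification_bytes
-- ===== SOURCE B (Python) =====
-- def _rotl15(x: int, k: int) -> int:
--     k %= 15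
--     return ((x << k) | (x >> (15 - k))) & 0x7FFF
--
-- def verifypw(password: str, verification_bytes: int) -> bool:
--     # Closed form: the checksum is the XOR of each character's rotated
--     # contribution (rotate distributes over XOR), plus the length term.
--     acc = len(password)
--     for i, ch in enumerate(password):
--         acc ^= _rotl15(ord(ch), i + 1)
--     return (acc ^ 0xCE4B) == verification_bytes
-- ===== Notes on version B (the rewrite author's own statement) =====
-- stated objective: alternative
-- what changed: Replaces A's stateful reversed-list feedback loop (each step rotates the running verifier left by one within 15 bits and XORs the next item) by a closed-form single pass: since the rotate step distributes over XOR, each character contributes independently rotl15(ord(ch), i+1), so B XORs these per-character contributions into the length term directly, with no list construction, no reversal and no feedback state.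
import Mathlib
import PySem

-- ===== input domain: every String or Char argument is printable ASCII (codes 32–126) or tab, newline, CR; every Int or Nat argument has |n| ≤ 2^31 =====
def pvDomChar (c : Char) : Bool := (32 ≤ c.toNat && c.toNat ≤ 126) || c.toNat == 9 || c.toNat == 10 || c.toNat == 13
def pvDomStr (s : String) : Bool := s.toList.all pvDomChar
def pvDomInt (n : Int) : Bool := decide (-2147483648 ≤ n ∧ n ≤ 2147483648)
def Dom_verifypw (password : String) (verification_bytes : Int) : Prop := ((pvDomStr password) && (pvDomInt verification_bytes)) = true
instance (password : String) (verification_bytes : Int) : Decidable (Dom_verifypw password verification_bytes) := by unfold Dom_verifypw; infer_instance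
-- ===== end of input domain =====

-- B replaces A's reversed-list feedback loop by a closed-form single pass XORing
-- per-character rotated contributions (alternative decomposition, same cost).


-- ===== PORT A =====
def verifypw (password : String) (verification_bytes : Int) : Bool :=
  let pw_arr : List Int :=
    ((PySem.Str.len password) :: password.toList.map (fun ch => ((ch.toNat : Nat) : Int))).reverse
  let verifier : Int := pw_arr.foldl
    (fun verifier b =>
      PySem.Int.bxor
        (PySem.Int.bxor (if PySem.Int.band verifier 0x4000 ≠ 0 then 1 else 0)
          (PySem.Int.band (verifier * 2) 0x7FFF)) b) 0
  decide (PySem.Int.bxor verifier 0xCE4B = verification_bytes)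

-- ===== PORT B =====
-- _rotl15 from Source B; 'k %= 15' leaves a nonnegative value, so '.toNat' is exact here
def rotl15Port (x : Int) (k : Int) : Int :=
  let j : Nat := (PySem.Int.mod k 15).toNat
  PySem.Int.band (PySem.Int.bor (x <<< j) (x >>> (15 - j))) 0x7FFF

def verifypw_alt (password : String) (verification_bytes : Int) : Bool :=
  let acc : Int := (PySem.List.enumerate password.toList).foldl
    (fun acc p => PySem.Int.bxor acc (rotl15Port ((p.2.toNat : Nat) : Int) (p.1 + 1)))
    (PySem.Str.len password)
  decide (PySem.Int.bxor acc 0xCE4B = verification_bytes)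

-- ===== PRECONDITION & SPEC =====
def Spec_verifypw (password : String) (verification_bytes : Int) (out : Bool) : Prop := out = verifypw_alt password verification_bytes
instance (password : String) (verification_bytes : Int) (out : Bool) : Decidable (Spec_verifypw password verification_bytes out) := by unfold Spec_verifypw; infer_instance

-- ===== CLAIM (what is proved, stated in full; the proofs are below) =====
def Claim_equal_verifypw : Prop := ∀ (password : String) (verification_bytes : Int), Dom_verifypw password verification_bytes → Spec_verifypw password verification_bytes (verifypw password verification_bytes)

-- ===== LEMMAS AND PROOFS =====

-- Nat-level model of A's loop step and of B's rotation
def rotStepN (v : Nat) : Nat := ((v >>> 14) &&& 1) ^^^ ((v <<< 1) &&& 0x7FFF)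

def rotlN (x : Nat) (k : Nat) : Nat := ((x <<< (k % 15)) ||| (x >>> (15 - k % 15))) &&& 0x7FFF

-- A's loop, over Nat
def foldA (v : Nat) (l : List Nat) : Nat := l.foldl (fun v b => rotStepN v ^^^ b) v

-- B's XOR of per-character contributions, starting at rotation index b+1
def contrib : List Nat → Nat → Nat
  | [], _ => 0
  | c :: t, b => rotlN c (b + 1) ^^^ contrib t (b + 1)

theorem testBit_rotStepN (v : Nat) (i : Nat) :
    (rotStepN v).testBit i = (decide (i < 15) && v.testBit ((i + 14) % 15)) := by
  simp only [rotStepN, Nat.testBit_xor, Nat.testBit_and, Nat.testBit_shiftRight,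
    Nat.testBit_shiftLeft]
  have h1 : (1 : Nat) = 2 ^ 1 - 1 := by norm_num
  have h2 : (0x7FFF : Nat) = 2 ^ 15 - 1 := by norm_num
  rw [h1, h2, Nat.testBit_two_pow_sub_one, Nat.testBit_two_pow_sub_one]
  by_cases hi : i < 15
  · rcases Nat.eq_zero_or_pos i with h0 | h0
    · subst h0; simp
    · have hn : ¬ i < 1 := by omega
      have he : (i + 14) % 15 = i - 1 := by omega
      simp [hn, he, show 1 ≤ i by omega, hi]
  · have hn : ¬ i < 1 := by omega
    simp [hn, hi]

theorem testBit_hi (x n i : Nat) (h : x < 2 ^ n) (hi : n ≤ i) : x.testBit i = false :=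
  Nat.testBit_eq_false_of_lt (h.trans_le (Nat.pow_le_pow_right (by norm_num) hi))

theorem testBit_rotlN (x : Nat) (hx : x < 2 ^ 15) (k i : Nat) :
    (rotlN x k).testBit i = (decide (i < 15) && x.testBit ((i + 15 - k % 15) % 15)) := by
  simp only [rotlN, Nat.testBit_and, Nat.testBit_or, Nat.testBit_shiftLeft,
    Nat.testBit_shiftRight]
  rw [show (0x7FFF : Nat) = 2 ^ 15 - 1 by norm_num, Nat.testBit_two_pow_sub_one]
  have hk : k % 15 < 15 := Nat.mod_lt _ (by norm_num)
  by_cases hi : i < 15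
  · by_cases hj : k % 15 ≤ i
    · have he : (i + 15 - k % 15) % 15 = i - k % 15 := by omega
      have hf : x.testBit (15 - k % 15 + i) = false := testBit_hi x 15 _ hx (by omega)
      simp [hj, he, hf, hi]
    · have he : (i + 15 - k % 15) % 15 = i + 15 - k % 15 := by omega
      have he2 : 15 - k % 15 + i = i + 15 - k % 15 := by omega
      simp [hj, hi, he, he2]
  · simp [hi]

theorem rotStepN_rotlN (x : Nat) (hx : x < 2 ^ 15) (k : Nat) :
    rotStepN (rotlN x k) = rotlN x (k + 1) := by
  apply Nat.eq_of_testBit_eq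
  intro i
  rw [testBit_rotStepN, testBit_rotlN x hx (k + 1)]
  by_cases hi : i < 15
  · rw [testBit_rotlN x hx k]
    have hm : (i + 14) % 15 < 15 := Nat.mod_lt _ (by norm_num)
    have hidx : ((i + 14) % 15 + 15 - k % 15) % 15 = (i + 15 - (k + 1) % 15) % 15 := by omega
    simp [hi, hm, hidx]
  · simp [hi]

theorem rotlN_zero (x : Nat) (hx : x < 2 ^ 15) : rotlN x 0 = x := by
  apply Nat.eq_of_testBit_eq
  intro i
  rw [testBit_rotlN x hx]
  by_cases hi : i < 15
  · simp [hi, Nat.mod_eq_of_lt hi]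
  · simp [hi, testBit_hi x 15 i hx (by omega)]

theorem rotStepN_eq_rotlN_one (x : Nat) (hx : x < 2 ^ 15) : rotStepN x = rotlN x 1 := by
  have h := rotStepN_rotlN x hx 0
  rwa [rotlN_zero x hx] at h

theorem rotStepN_xor (x y : Nat) : rotStepN (x ^^^ y) = rotStepN x ^^^ rotStepN y := by
  apply Nat.eq_of_testBit_eq
  intro i
  rw [Nat.testBit_xor, testBit_rotStepN, testBit_rotStepN, testBit_rotStepN, Nat.testBit_xor]
  by_cases hi : i < 15 <;> simp [hi]

theorem rotStepN_contrib (l : List Nat) (hl : ∀ c ∈ l, c < 2 ^ 15) (b : Nat) :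
    rotStepN (contrib l b) = contrib l (b + 1) := by
  induction l generalizing b with
  | nil => simp [contrib, rotStepN]
  | cons c t ih =>
    have hc : c < 2 ^ 15 := hl c (by simp)
    simp only [contrib]
    rw [rotStepN_xor, rotStepN_rotlN c hc, ih (fun x hx => hl x (by simp [hx]))]

-- A's loop over the reversed character codes, then one more rotation, is B's XOR sum
theorem foldA_reverse (l : List Nat) (hl : ∀ c ∈ l, c < 2 ^ 15) :
    rotStepN (foldA 0 l.reverse) = contrib l 0 := by
  induction l with
  | nil => simp [foldA, contrib, rotStepN]
  | cons c t ih =>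
    have hc : c < 2 ^ 15 := hl c (by simp)
    have ht : ∀ x ∈ t, x < 2 ^ 15 := fun x hx => hl x (by simp [hx])
    have hstep : foldA 0 (c :: t).reverse = rotStepN (foldA 0 t.reverse) ^^^ c := by
      simp [foldA, List.foldl_append]
    rw [hstep, ih ht, rotStepN_xor, rotStepN_contrib t ht 0,
      rotStepN_eq_rotlN_one c hc]
    simp [contrib, Nat.xor_comm]

-- ===== Bridges between the Int ports and the Nat model =====

theorem if_band_four (v : Nat) :
    (if (v &&& 0x4000 ≠ 0) then (1 : Nat) else 0) = (v >>> 14) &&& 1 := by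
  have h4 : (0x4000 : Nat) = 2 ^ 14 := by norm_num
  have ha : v &&& 2 ^ 14 = (v.testBit 14).toNat * 2 ^ 14 := Nat.and_two_pow v 14
  have h1 : (v >>> 14) &&& 1 = if v.testBit 14 then 1 else 0 := by
    rw [Nat.and_one_is_mod, Nat.shiftRight_eq_div_pow, Nat.testBit_eq_decide_div_mod_eq]
    norm_num
    split_ifs with h
    · exact h
    · omega
  rw [h1, h4, ha]
  rcases v.testBit 14 <;> simp

theorem stepA_natCast (v b : Nat) :
    PySem.Int.bxor
      (PySem.Int.bxor (if PySem.Int.band (v : Int) 0x4000 ≠ 0 then 1 else 0)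
        (PySem.Int.band ((v : Int) * 2) 0x7FFF)) (b : Int)
    = ((rotStepN v ^^^ b : Nat) : Int) := by
  have hm : ((v : Int) * 2) = ((v * 2 : Nat) : Int) := by push_cast; ring
  have h4 : (0x4000 : Int) = ((0x4000 : Nat) : Int) := by norm_num
  have h7 : (0x7FFF : Int) = ((0x7FFF : Nat) : Int) := by norm_num
  rw [hm, h4, h7, PySem.Int.band_natCast, PySem.Int.band_natCast]
  have hif : (if ((v &&& 0x4000 : Nat) : Int) ≠ 0 then (1 : Int) else 0)
      = (((if (v &&& 0x4000 ≠ 0) then (1 : Nat) else 0) : Nat) : Int) := by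
    by_cases h : v &&& 0x4000 = 0 <;> simp [h]
  rw [hif, PySem.Int.bxor_natCast, PySem.Int.bxor_natCast]
  congr 1
  rw [if_band_four]
  unfold rotStepN
  rw [Nat.shiftLeft_eq]

theorem foldA_natCast (l : List Nat) (v : Nat) :
    (l.map (fun (n : Nat) => (n : Int))).foldl
      (fun verifier b =>
        PySem.Int.bxor
          (PySem.Int.bxor (if PySem.Int.band verifier 0x4000 ≠ 0 then 1 else 0)
            (PySem.Int.band (verifier * 2) 0x7FFF)) b) (v : Int)
    = ((foldA v l : Nat) : Int) := by
  induction l generalizing v with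
  | nil => simp [foldA]
  | cons c t ih =>
    simp only [List.map_cons, List.foldl_cons]
    rw [stepA_natCast, ih]
    simp [foldA]

theorem rotl15Port_natCast (x k : Nat) :
    rotl15Port (x : Int) (k : Int) = ((rotlN x k : Nat) : Int) := by
  have hj : (PySem.Int.mod (k : Int) 15).toNat = k % 15 := by
    rw [show (15 : Int) = ((15 : Nat) : Int) from by norm_num, PySem.Int.mod_natCast]
    omega
  show PySem.Int.band
      (PySem.Int.bor ((x : Int) <<< (PySem.Int.mod (k : Int) 15).toNat)
        ((x : Int) >>> (15 - (PySem.Int.mod (k : Int) 15).toNat))) 0x7FFF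
    = ((rotlN x k : Nat) : Int)
  rw [hj, ← Int.natCast_shiftLeft, ← Int.natCast_shiftRight, PySem.Int.bor_natCast,
    show (0x7FFF : Int) = ((0x7FFF : Nat) : Int) from by norm_num, PySem.Int.band_natCast]
  rfl

theorem foldB_natCast (l : List Char) (s a : Nat) :
    (PySem.List.enumerate l (s : Int)).foldl
      (fun acc p => PySem.Int.bxor acc (rotl15Port ((p.2.toNat : Nat) : Int) (p.1 + 1))) (a : Int)
    = ((a ^^^ contrib (l.map Char.toNat) s : Nat) : Int) := by
  induction l generalizing s a with
  | nil => simp [PySem.List.enumerate_nil, contrib]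
  | cons c t ih =>
    rw [PySem.List.enumerate_cons, List.foldl_cons]
    have hcast : ((s : Int) + 1) = ((s + 1 : Nat) : Int) := by push_cast; ring
    show List.foldl _ (PySem.Int.bxor (a : Int) (rotl15Port ((c.toNat : Nat) : Int) ((s : Int) + 1)))
        (PySem.List.enumerate t ((s : Int) + 1)) = _
    rw [hcast, rotl15Port_natCast, PySem.Int.bxor_natCast,
      ih (s + 1) (a ^^^ rotlN c.toNat (s + 1))]
    simp only [List.map_cons, contrib]
    congr 1
    rw [Nat.xor_assoc]

theorem dom_char_lt (password : String) (h : pvDomStr password = true) :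
    ∀ c ∈ password.toList.map Char.toNat, c < 2 ^ 15 := by
  intro c hc
  simp only [List.mem_map] at hc
  obtain ⟨ch, hch, rfl⟩ := hc
  have hd := (List.all_eq_true.mp h) ch hch
  simp only [pvDomChar, Bool.or_eq_true, Bool.and_eq_true, decide_eq_true_eq, beq_iff_eq] at hd
  omega

-- ===== VERDICT (by name: the statement is the Claim_ definition above) =====
theorem verifypw_spec : Claim_equal_verifypw := by
  intro password verification_bytes hdom
  unfold Spec_verifypw verifypw verifypw_alt
  simp only [Dom_verifypw, Bool.and_eq_true] at hdom
  have hl := dom_char_lt password hdom.1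
  have hcons : (PySem.Str.len password) :: password.toList.map (fun ch => ((ch.toNat : Nat) : Int))
      = ((password.toList.length :: password.toList.map Char.toNat).map (fun (n : Nat) => (n : Int))) := by
    rw [PySem.Str.len_eq, List.map_cons, List.map_map]
    rfl
  have hrev : ((password.toList.length :: password.toList.map Char.toNat).map
        (fun (n : Nat) => (n : Int))).reverse
      = ((password.toList.length :: password.toList.map Char.toNat).reverse).map
        (fun (n : Nat) => (n : Int)) :=
    List.map_reverse.symm
  have hA := foldA_natCast ((password.toList.length :: password.toList.map Char.toNat).reverse) 0
  rw [Nat.cast_zero] at hA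
  have hfold : foldA 0 ((password.toList.length :: password.toList.map Char.toNat).reverse)
      = contrib (password.toList.map Char.toNat) 0 ^^^ password.toList.length := by
    rw [List.reverse_cons]
    have hsplit : foldA 0 ((password.toList.map Char.toNat).reverse ++ [password.toList.length])
        = rotStepN (foldA 0 (password.toList.map Char.toNat).reverse) ^^^ password.toList.length := by
      unfold foldA
      rw [List.foldl_append]
      simp only [List.foldl_cons, List.foldl_nil]
    rw [hsplit, foldA_reverse _ hl]
  rw [hfold] at hA
  have hB := foldB_natCast password.toList 0 password.toList.length
  rw [Nat.cast_zero] at hB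
  show decide (PySem.Int.bxor
      ((((PySem.Str.len password) ::
          password.toList.map (fun ch => ((ch.toNat : Nat) : Int))).reverse).foldl
        (fun verifier b =>
          PySem.Int.bxor
            (PySem.Int.bxor (if PySem.Int.band verifier 0x4000 ≠ 0 then 1 else 0)
              (PySem.Int.band (verifier * 2) 0x7FFF)) b) 0) 0xCE4B = verification_bytes)
    = decide (PySem.Int.bxor
      ((PySem.List.enumerate password.toList).foldl
        (fun acc p => PySem.Int.bxor acc (rotl15Port ((p.2.toNat : Nat) : Int) (p.1 + 1)))
        (PySem.Str.len password)) 0xCE4B = verification_bytes)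
  rw [hcons, hrev, hA, PySem.Str.len_eq, hB, Nat.xor_comm]
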